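-- pv_equiv track=rewrite | github.com/zhangsmallshark/gen_aie | sparse_mat.py | intra_partition
-- ===== SOURCE A (Python) =====
-- class MovingAverage(object):
--     """Computes and stores the average and current value"""
--
--     def __init__(self, th):
--         self.th = th
--         self.pre_avg = 0
--         self.cur_avg = 0
--         self.max = 0
--         self.sum = 0
--         self.count = 0
--
--     def reset(self):
--         self.pre_avg = 0
--         self.cur_avg = 0
--         self.max = 0
--         self.sum = 0
--         self.count = 0
--
--     def update(self, val, n=1):
--         self.sum += val * n
--         self.count += n
--         self.pre_avg = self.cur_avg
--         # self.cur_avg = self.sum / self.count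
--         self.cur_avg = val
--         if self.pre_avg == 0:
--             self.pre_avg = self.cur_avg
--
--         # if self.pre_avg > 4 and abs(self.cur_avg - self.pre_avg) / self.pre_avg >= self.th:
--         # if self.pre_avg > 4 and abs(self.cur_avg - self.pre_avg) >= 4:
--         if abs(self.cur_avg - self.pre_avg) >= 4:
--             return True
--         else:
--             if val > self.max:
--                 self.max = val
--             return False
--
-- def intra_partition(nnz):
--     ave_nnz = MovingAverage(0.15)
--     par_dic = {}
--     idx_par = 0
--     len_d = len(nnz)
--     i = 0
--     for i in range(len_d):
--         nnz_row_i = nnz[i]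
--         s0 = ave_nnz.update(nnz_row_i)
--         if s0:
--             par_dic[idx_par] = [ave_nnz.max, i - ave_nnz.count + 1, ave_nnz.count - 1]
--             idx_par += 1
--             ave_nnz.reset()
--             ave_nnz.update(nnz_row_i)
--
--     if not par_dic:
--         par_dic[idx_par] = [ave_nnz.max, 0, ave_nnz.count]
--     elif par_dic[idx_par - 1][1] + par_dic[idx_par - 1][2] < len_d:
--         par_dic[idx_par] = [ave_nnz.max, i - ave_nnz.count + 1, ave_nnz.count]
--
--     return par_dic
-- ===== SOURCE B (Python) =====
-- def intra_partition(nnz):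
--     # Breakpoint-first decomposition: compute all segment boundaries up front,
--     # then emit one entry per consecutive boundary pair (no state machine).
--     if not nnz:
--         return {0: [0, 0, 0]}
--     bounds = [0]
--     for j, (p, c) in enumerate(zip(nnz, nnz[1:]), 1):
--         if p != 0 and abs(c - p) >= 4:
--             bounds.append(j)
--     bounds.append(len(nnz))
--     return {k: [max(0, max(nnz[s:e])), s, e - s]
--             for k, (s, e) in enumerate(zip(bounds, bounds[1:]))}
-- ===== Notes on version B (the rewrite author's own statement) =====
-- stated objective: simpler
-- what changed: Replaces A's MovingAverage state-machine class (running dict, index bookkeeping and two post-loop fixup branches) with a breakpoint-first decomposition: one pass collects all segment boundaries, then one comprehension emits an entry per consecutive boundary pair.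
import Mathlib
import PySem

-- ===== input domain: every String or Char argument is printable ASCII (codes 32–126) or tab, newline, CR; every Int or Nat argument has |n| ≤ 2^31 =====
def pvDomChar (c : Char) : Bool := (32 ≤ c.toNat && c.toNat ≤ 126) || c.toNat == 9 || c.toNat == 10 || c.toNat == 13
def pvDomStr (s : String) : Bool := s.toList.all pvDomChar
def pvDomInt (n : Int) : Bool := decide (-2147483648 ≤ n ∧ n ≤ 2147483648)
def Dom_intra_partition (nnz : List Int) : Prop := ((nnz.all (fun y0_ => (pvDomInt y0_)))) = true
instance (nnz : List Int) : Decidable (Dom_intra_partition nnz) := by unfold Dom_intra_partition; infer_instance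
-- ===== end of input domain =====

-- B replaces A's MovingAverage state machine by a breakpoint-first decomposition
-- (collect all segment boundaries, then emit one entry per consecutive pair); objective: simpler.

-- ===== PORT A =====
-- class MovingAverage; the field 'th' (float 0.15) is never read by any executed line, so it is omitted.
structure MovingAverage where
  pre_avg : Int
  cur_avg : Int
  max : Int
  sum : Int
  count : Int
deriving Repr, DecidableEq

def MovingAverage.initState : MovingAverage := ⟨0, 0, 0, 0, 0⟩

def MovingAverage.reset (_ : MovingAverage) : MovingAverage := ⟨0, 0, 0, 0, 0⟩

def MovingAverage.update (m : MovingAverage) (val : Int) : Bool × MovingAverage :=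
  let sum := m.sum + val * 1
  let count := m.count + 1
  let pre0 := m.cur_avg          -- self.pre_avg = self.cur_avg
  let cur := val                 -- self.cur_avg = val
  let pre := if pre0 = 0 then cur else pre0
  if 4 ≤ |cur - pre| then
    (true, ⟨pre, cur, m.max, sum, count⟩)
  else
    (false, ⟨pre, cur, if m.max < val then val else m.max, sum, count⟩)

-- one iteration of A's for-loop; p = (i, nnz[i])
def aStep (st : MovingAverage × PySem.Dict Int (List Int) × Int × Int) (p : Int × Int) :
    MovingAverage × PySem.Dict Int (List Int) × Int × Int :=
  let (ave, dic, idx, _) := st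
  let i := p.1
  let nnz_row_i := p.2
  let upd := ave.update nnz_row_i
  if upd.1 then
    let dic1 := dic.insert idx [upd.2.max, i - upd.2.count + 1, upd.2.count - 1]
    (((upd.2.reset).update nnz_row_i).2, dic1, idx + 1, i)
  else
    (upd.2, dic, idx, i)

-- A's code after the loop; the dict lookups par_dic[idx_par-1][1]/[2] cannot miss, ported with getD/pyGetD
def aFix (len_d : Int) (st : MovingAverage × PySem.Dict Int (List Int) × Int × Int) :
    List (Int × List Int) :=
  let (ave, dic, idx, i) := st
  if dic.items = [] then (dic.insert idx [ave.max, 0, ave.count]).items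
  else if PySem.List.pyGetD (dic.getD (idx - 1) []) 1 0 +
          PySem.List.pyGetD (dic.getD (idx - 1) []) 2 0 < len_d then
    (dic.insert idx [ave.max, i - ave.count + 1, ave.count]).items
  else dic.items

def intra_partition (nnz : List Int) : List (Int × List Int) :=
  let len_d : Int := (nnz.length : Int)
  -- nnz[i] with i drawn from range(len_d) is always in range, so pyGetD is exact here
  aFix len_d ((PySem.List.pyRange 0 len_d 1).foldl
    (fun st i => aStep st (i, PySem.List.pyGetD nnz i 0))
    (MovingAverage.initState, PySem.Dict.empty, 0, 0))

-- ===== PORT B =====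
def bKeep (q : Int × Int × Int) : Bool := decide (q.2.1 ≠ 0 ∧ 4 ≤ |q.2.2 - q.2.1|)

-- one entry of B's dict comprehension; the slice nnz[s:e] is nonempty by construction, so
-- Python's max(nnz[s:e]) is exact as max? with the (unreachable) default 0
def bSeg (nnz : List Int) (p : Int × Int × Int) : Int × List Int :=
  (p.1, [max 0 ((PySem.List.max? (PySem.List.slice nnz (some p.2.1) (some p.2.2)) (fun y => y)).getD 0),
         p.2.1, p.2.2 - p.2.1])

def intra_partition_alt (nnz : List Int) : List (Int × List Int) :=
  if nnz = [] then [(0, [0, 0, 0])]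
  else
    let bounds := (0 :: (PySem.List.enumerate (nnz.zip (PySem.List.slice nnz (some 1) none)) 1).foldl
        (fun acc q => if bKeep q then acc ++ [q.1] else acc) []) ++ [(nnz.length : Int)]
    (PySem.List.enumerate (bounds.zip bounds.tail) 0).map (bSeg nnz)

-- ===== PRECONDITION & SPEC =====
def Spec_intra_partition (nnz : List Int) (out : List (Int × List Int)) : Prop := out = intra_partition_alt nnz
instance (nnz : List Int) (out : List (Int × List Int)) : Decidable (Spec_intra_partition nnz out) := by unfold Spec_intra_partition; infer_instance

-- ===== CLAIM (what is proved, stated in full; the proofs are below) =====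
def Claim_equal_intra_partition : Prop := ∀ (nnz : List Int), Dom_intra_partition nnz → Spec_intra_partition nnz (intra_partition nnz)

-- ===== LEMMAS AND PROOFS =====

-- max of a segment, floored at 0 (A's MovingAverage.max over one segment)
def segMax (seg : List Int) : Int := seg.foldl max 0

-- the breakpoint positions ≥ j in rest, given the previous value prev
def brkL (j prev : Int) : List Int → List Int
  | [] => []
  | y :: ys => if prev ≠ 0 ∧ 4 ≤ |y - prev| then j :: brkL (j + 1) y ys else brkL (j + 1) y ys

theorem foldl_max_max (t : List Int) : ∀ a b : Int, t.foldl max (max a b) = max a (t.foldl max b) := by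
  induction t with
  | nil => intro a b; simp
  | cons y t ih => intro a b; simp only [List.foldl_cons, max_assoc, ih]

theorem segMax_cons (c : Int) (t : List Int) : segMax (c :: t) = max 0 (t.foldl max c) := by
  simp only [segMax, List.foldl_cons]
  have := foldl_max_max t 0 c
  simpa using this

theorem segMax_append (seg : List Int) (y : Int) : segMax (seg ++ [y]) = max (segMax seg) y := by
  simp [segMax, List.foldl_append]

theorem segMax_step (seg : List Int) (y : Int) :
    (if segMax seg < y then y else segMax seg) = segMax (seg ++ [y]) := by
  rw [segMax_append]; split_ifs <;> omega

theorem segMax_single (y : Int) : (if (0 : Int) < y then y else 0) = segMax [y] := by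
  simp only [segMax, List.foldl_cons, List.foldl_nil]; split_ifs <;> omega

-- B's breakpoint loop computes brkL
theorem brk_loop (xs : List Int) : ∀ (prev j : Int) (acc : List Int),
    (PySem.List.enumerate ((prev :: xs).zip xs) j).foldl
        (fun acc q => if bKeep q then acc ++ [q.1] else acc) acc
      = acc ++ brkL j prev xs := by
  induction xs with
  | nil => intro prev j acc; simp [brkL, PySem.List.enumerate_nil]
  | cons y ys ih =>
    intro prev j acc
    rw [List.zip_cons_cons, PySem.List.enumerate_cons, List.foldl_cons, ih]
    by_cases h : prev ≠ 0 ∧ 4 ≤ |y - prev|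
    · simp [bKeep, h, brkL, List.append_assoc]
    · simp [bKeep, h, brkL]

-- the slice of nnz covering the current open segment is that segment
theorem slice_seg (nnz seg rest : List Int) (s : Nat) (hdrop : nnz.drop s = seg ++ rest) :
    PySem.List.slice nnz (some (s : Int)) (some ((s : Int) + (seg.length : Int))) = seg := by
  have : ((s : Int) + (seg.length : Int)) = ((s + seg.length : Nat) : Int) := by push_cast; ring
  rw [this, PySem.List.slice_natCast, hdrop]
  simp

theorem max0_slice (nnz seg rest : List Int) (s : Nat) (hseg : seg ≠ [])
    (hdrop : nnz.drop s = seg ++ rest) :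
    max 0 ((PySem.List.max? (PySem.List.slice nnz (some (s : Int))
        (some ((s : Int) + (seg.length : Int)))) (fun y => y)).getD 0) = segMax seg := by
  rw [slice_seg nnz seg rest s hdrop]
  obtain ⟨c, t, rfl⟩ := List.exists_cons_of_ne_nil hseg
  rw [PySem.List.max?_id_cons, segMax_cons]
  rfl

-- one entry of B's output for a fully determined segment equals A's emitted entry
theorem bSeg_entry (nnz seg rest : List Int) (s : Nat) (kI sI mI : Int)
    (hseg : seg ≠ []) (hdrop : nnz.drop s = seg ++ rest)
    (hsI : sI = (s : Int)) (hmI : mI = (s : Int) + (seg.length : Int)) :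
    bSeg nnz (kI, sI, mI) = (kI, [segMax seg, sI, (seg.length : Int)]) := by
  subst hsI hmI
  simp only [bSeg]
  rw [max0_slice nnz seg rest s hseg hdrop]
  norm_num

-- main invariant: running A's remaining loop iterations and its post-loop fixup extends the
-- already-emitted entries E by exactly B's entries for the remaining segment boundaries
theorem amain (nnz : List Int) : ∀ (rest seg : List Int) (prev cnt i0 idxI mI : Int)
    (s k : Nat) (E : List (Int × List Int)) (dic : PySem.Dict Int (List Int)) (pre sm : Int),
    seg ≠ [] →
    seg.getLast? = some prev →
    nnz.drop s = seg ++ rest →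
    nnz.length = s + seg.length + rest.length →
    cnt = (seg.length : Int) →
    i0 = (s : Int) + cnt - 1 →
    idxI = (k : Int) →
    mI = (s : Int) + cnt →
    dic.items = E →
    E.map Prod.fst = PySem.List.pyRange 0 (k : Int) 1 →
    ((E = [] ∧ k = 0 ∧ s = 0) ∨
      (∃ E₀ mx l1 l2, E = E₀ ++ [((k : Int) - 1, [mx, l1, l2])] ∧ l1 + l2 = (s : Int))) →
    aFix (nnz.length : Int)
      ((PySem.List.enumerate rest mI).foldl aStep
        (⟨pre, prev, segMax seg, sm, cnt⟩, dic, idxI, i0))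
    = E ++ (PySem.List.enumerate
        ((((s : Int) :: (brkL mI prev rest ++ [(nnz.length : Int)])).zip
          (brkL mI prev rest ++ [(nnz.length : Int)]))) idxI).map (bSeg nnz) := by
  intro rest
  induction rest with
  | nil =>
    intro seg prev cnt i0 idxI mI s k E dic pre sm hseg hlast hdrop hlen hcnt hi0 hidx hmI hitems hkeys hE
    have hn : (nnz.length : Int) = (s : Int) + (seg.length : Int) := by
      simp only [List.length_nil] at hlen; omega
    simp only [PySem.List.enumerate_nil, List.foldl_nil, brkL, List.nil_append,
      List.zip_cons_cons, List.zip_nil_right, PySem.List.enumerate_cons,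
      PySem.List.enumerate_nil, List.map_cons, List.map_nil]
    rw [bSeg_entry nnz seg [] s idxI ((s : Int)) ((nnz.length : Int)) hseg (by simpa using hdrop) rfl hn]
    rcases hE with ⟨hE0, hk, hs⟩ | ⟨E₀, mx, l1, l2, hEeq, hsum⟩
    · subst hE0 hk hs hcnt hidx
      have hdic : dic = PySem.Dict.empty := PySem.Dict.ext (by simpa using hitems)
      subst hdic
      simp only [aFix]
      rw [if_pos hitems, PySem.Dict.items_insert_of_not_contains _ _ (PySem.Dict.contains_empty _)]
      simp [hitems]
    · have hlpos : 0 < seg.length := List.length_pos_of_ne_nil hseg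
      have hne : dic.items ≠ [] := by rw [hitems, hEeq]; simp
      have hnd : dic.keys.Nodup := by
        simp only [PySem.Dict.keys, hitems]
        rw [show (E.map fun p => p.1) = E.map Prod.fst from rfl, hkeys]
        exact PySem.List.nodup_pyRange_one _ _
      have hmem : ((k : Int) - 1, [mx, l1, l2]) ∈ dic.items := by rw [hitems, hEeq]; simp
      have hget : dic.getD ((k : Int) - 1) [] = [mx, l1, l2] :=
        PySem.Dict.getD_of_mem_items dic hmem hnd []
      have hcont : dic.contains ((k : Int)) = false := by
        rw [PySem.Dict.contains_eq_decide_mem_keys]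
        simp only [PySem.Dict.keys, hitems]
        rw [show (E.map fun p => p.1) = E.map Prod.fst from rfl, hkeys]
        simp [PySem.List.mem_pyRange_one]
      simp only [aFix, if_neg hne, hidx]
      rw [hget]
      rw [if_pos (by simp [PySem.List.pyGetD]; omega)]
      rw [PySem.Dict.items_insert_of_not_contains _ _ hcont, hitems]
      rw [show i0 - cnt + 1 = (s : Int) from by omega, hcnt]
  | cons y ys ih =>
    intro seg prev cnt i0 idxI mI s k E dic pre sm hseg hlast hdrop hlen hcnt hi0 hidx hmI hitems hkeys hE
    subst hcnt hi0 hidx hmI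
    have hlpos : 0 < seg.length := List.length_pos_of_ne_nil hseg
    rw [PySem.List.enumerate_cons, List.foldl_cons]
    by_cases hbr : prev ≠ 0 ∧ 4 ≤ |y - prev|
    · -- break at this element
      have hc : 4 ≤ |y - (if prev = 0 then y else prev)| := by
        rw [if_neg hbr.1]; exact hbr.2
      simp only [aStep, MovingAverage.update, MovingAverage.reset, if_pos hc]
      norm_num
      rw [segMax_single]
      rw [show ((s : Int) + ↑seg.length - (↑seg.length + 1) + 1) = (s : Int) from by ring]
      rw [show brkL ((s : Int) + ↑seg.length) prev (y :: ys)
            = ((s : Int) + ↑seg.length) :: brkL ((s : Int) + ↑seg.length + 1) y ys from by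
        simp [brkL, hbr]]
      simp only [List.cons_append, List.zip_cons_cons, PySem.List.enumerate_cons, List.map_cons]
      rw [bSeg_entry nnz seg (y :: ys) s ((k : Int)) ((s : Int)) ((s : Int) + ↑seg.length)
        hseg hdrop rfl rfl]
      have hcont : dic.contains ((k : Int)) = false := by
        rw [PySem.Dict.contains_eq_decide_mem_keys]
        simp only [PySem.Dict.keys, hitems]
        rw [show (E.map fun p => p.1) = E.map Prod.fst from rfl, hkeys]
        simp [PySem.List.mem_pyRange_one]
      rw [show E ++ ((k : Int), [segMax seg, (s : Int), (seg.length : Int)])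
              :: List.map (bSeg nnz) (PySem.List.enumerate
                ((((s : Int) + ↑seg.length) :: (brkL ((s : Int) + ↑seg.length + 1) y ys
                    ++ [(nnz.length : Int)])).zip
                  (brkL ((s : Int) + ↑seg.length + 1) y ys ++ [(nnz.length : Int)])) ((k : Int) + 1))
            = (E ++ [((k : Int), [segMax seg, (s : Int), (seg.length : Int)])])
              ++ List.map (bSeg nnz) (PySem.List.enumerate
                ((((s : Int) + ↑seg.length) :: (brkL ((s : Int) + ↑seg.length + 1) y ys
                    ++ [(nnz.length : Int)])).zip
                  (brkL ((s : Int) + ↑seg.length + 1) y ys ++ [(nnz.length : Int)]))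
                ((k : Int) + 1)) from by simp]
      simp only [show ((s : Int) + (seg.length : Int)) = ((s + seg.length : Nat) : Int) from by
        push_cast; ring]
      exact ih [y] y 1 (((s + seg.length : Nat) : Int)) ((k : Int) + 1)
        (((s + seg.length : Nat) : Int) + 1) (s + seg.length) (k + 1)
        (E ++ [((k : Int), [segMax seg, (s : Int), (seg.length : Int)])])
        (dic.insert ((k : Int)) [segMax seg, (s : Int), (seg.length : Int)]) y y
        (by simp) (by simp)
        (by rw [← List.drop_drop, hdrop, List.drop_left]; rfl)
        (by simp at hlen ⊢; omega)
        (by simp) (by ring) (by push_cast; ring_nf) (by push_cast; ring)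
        (by rw [PySem.Dict.items_insert_of_not_contains _ _ hcont, hitems])
        (by rw [List.map_append, hkeys]
            push_cast
            rw [PySem.List.pyRange_one_succ_right (Int.natCast_nonneg k)]
            simp)
        (Or.inr ⟨E, segMax seg, (s : Int), (seg.length : Int),
          by push_cast; ring_nf, by push_cast; ring⟩)
    · -- no break: the open segment is extended by y
      have hc : ¬ 4 ≤ |y - (if prev = 0 then y else prev)| := by
        by_cases hp : prev = 0
        · simp [hp]
        · rw [if_neg hp]; exact fun h => hbr ⟨hp, h⟩
      simp only [aStep, MovingAverage.update, if_neg hc, Bool.false_eq_true, if_false]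
      rw [segMax_step]
      rw [show brkL (↑s + ↑seg.length) prev (y :: ys) = brkL (↑s + ↑seg.length + 1) y ys from by
        simp [brkL, hbr]]
      exact ih (seg ++ [y]) y ((seg.length : Int) + 1) ((s : Int) + (seg.length : Int)) (k : Int)
        ((s : Int) + (seg.length : Int) + 1) s k E dic (if prev = 0 then y else prev) (sm + y * 1)
        (by simp) (by simp) (by simpa using hdrop)
        (by simp at hlen ⊢; omega)
        (by simp) (by ring) rfl (by ring) hitems hkeys hE

-- ===== VERDICT (by name: the statement is the Claim_ definition above) =====
-- A's index loop over range(len(nnz)) is the fold of aStep over enumerate(nnz)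
theorem a_loop_enum (m : List Int) :
    (PySem.List.pyRange 0 (m.length : Int) 1).foldl
      (fun st i => aStep st (i, PySem.List.pyGetD m i 0))
      (MovingAverage.initState, PySem.Dict.empty, 0, 0)
    = (PySem.List.enumerate m 0).foldl aStep
      (MovingAverage.initState, PySem.Dict.empty, 0, 0) := by
  rw [PySem.List.enumerate_eq_map_pyRange m 0, List.foldl_map]
  simp

theorem intra_partition_spec : Claim_equal_intra_partition := by
  intro nnz _
  unfold Spec_intra_partition
  cases nnz with
  | nil => decide
  | cons x xs =>
    unfold intra_partition
    show aFix (((x :: xs).length : Int))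
        ((PySem.List.pyRange 0 (((x :: xs).length : Int)) 1).foldl
          (fun st i => aStep st (i, PySem.List.pyGetD (x :: xs) i 0))
          (MovingAverage.initState, PySem.Dict.empty, 0, 0))
      = intra_partition_alt (x :: xs)
    rw [a_loop_enum, PySem.List.enumerate_cons, List.foldl_cons]
    simp only [aStep, MovingAverage.update, MovingAverage.initState]
    norm_num
    rw [segMax_single]
    rw [show ((xs.length : Int) + 1) = (((x :: xs).length : Nat) : Int) from by simp]
    rw [amain (x :: xs) xs [x] x 1 0 0 1 0 0 [] PySem.Dict.empty x x
      (by simp) (by simp) (by simp) (by simp [Nat.add_comm]) (by simp) (by norm_num) (by norm_num)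
      (by norm_num) rfl (by simp [PySem.List.pyRange]) (Or.inl ⟨rfl, rfl, rfl⟩)]
    unfold intra_partition_alt
    rw [if_neg (by simp)]
    rw [PySem.List.slice_from_one]
    simp only [List.tail_cons]
    rw [brk_loop xs x 1 []]
    simp [List.cons_append]
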